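-- pv_equiv track=rewrite | github.com/kovinevmv/Sandbox | Scripts/ll_parser/ll..py | GetNewNonTerminal
-- ===== SOURCE A (Python) =====
-- import string
--
-- def GetNonTerminals(productions):
--     ReturnSet = set()
--     for i in productions:
--         ReturnSet.add(i)
--     return ReturnSet
--
-- def GetNewNonTerminal(productions):
--     nonTerminals = GetNonTerminals(productions)
--     newNonTerminal = ""
--     for i in string.ascii_uppercase:
--         if i not in nonTerminals:
--             newNonTerminal = i
--             break
--     if not newNonTerminal: raise Exception("Too many nonTerminals")
--     return newNonTerminal
-- ===== SOURCE B (Python) =====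
-- import string
--
-- def GetNewNonTerminal(productions):
--     used = set(productions)
--     available = set(string.ascii_uppercase) - used
--     if not available:
--         raise Exception("Too many nonTerminals")
--     return min(available)
-- ===== Notes on version B (the rewrite author's own statement) =====
-- stated objective: simpler
-- what changed: Replaces the letter-by-letter scan with a break by building the complement set ascii_uppercase - used once and reducing it with min (the alphabetically first unused letter).
import Mathlib
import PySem

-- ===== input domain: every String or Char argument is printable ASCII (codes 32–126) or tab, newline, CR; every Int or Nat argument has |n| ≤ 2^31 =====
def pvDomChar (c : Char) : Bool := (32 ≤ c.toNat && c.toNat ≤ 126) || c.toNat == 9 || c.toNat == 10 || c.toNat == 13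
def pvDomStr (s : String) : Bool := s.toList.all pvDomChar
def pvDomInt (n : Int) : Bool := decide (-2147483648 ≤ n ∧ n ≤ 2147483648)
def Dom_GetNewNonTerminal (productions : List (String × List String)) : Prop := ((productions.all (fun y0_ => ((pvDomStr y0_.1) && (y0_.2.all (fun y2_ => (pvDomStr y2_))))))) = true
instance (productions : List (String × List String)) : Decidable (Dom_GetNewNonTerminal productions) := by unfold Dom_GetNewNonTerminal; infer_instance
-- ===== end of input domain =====

-- B builds the complement set ascii_uppercase - used and takes its min, instead of A's
-- first-hit scan over the alphabet; equivalence of return values is proved on Pre_ (some letter free).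

-- string.ascii_uppercase, iterated as a list of one-character strings
def pvUpper : List String :=
  ["A","B","C","D","E","F","G","H","I","J","K","L","M",
   "N","O","P","Q","R","S","T","U","V","W","X","Y","Z"]

-- ===== PORT A =====
-- for i in productions: ReturnSet.add(i)   (dict iteration yields the keys)
def GetNonTerminals (productions : List (String × List String)) : PySem.Set String :=
  productions.foldl (fun s p => PySem.Set.add s p.1) PySem.Set.empty

-- the for-loop with break: first uppercase letter not in the set, "" if none
def pvFirstFree (nonTerminals : PySem.Set String) : List String → String
  | [] => ""
  | c :: rest => if PySem.Set.contains nonTerminals c then pvFirstFree nonTerminals rest else c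

def GetNewNonTerminal (productions : List (String × List String)) : String :=
  pvFirstFree (GetNonTerminals productions) pvUpper
  -- the 'raise Exception("Too many nonTerminals")' branch (result "") lies outside Pre_

-- ===== PORT B =====
def GetNewNonTerminal_alt (productions : List (String × List String)) : String :=
  ((PySem.List.min? (PySem.Set.diff (PySem.Set.ofList pvUpper) (PySem.Set.ofList (productions.map Prod.fst))) (fun x => x)).getD "")
  -- 'if not available: raise Exception(...)' (min? = none) lies outside Pre_

-- ===== PRECONDITION & SPEC =====
-- Pre_ excludes exactly the inputs where every uppercase letter is a key: there A raises
-- Exception("Too many nonTerminals") and B raises the same exception.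
def Pre_GetNewNonTerminal (productions : List (String × List String)) : Prop :=
  (pvUpper.any (fun c => !((productions.map Prod.fst).contains c))) = true
instance (productions : List (String × List String)) : Decidable (Pre_GetNewNonTerminal productions) := by unfold Pre_GetNewNonTerminal; infer_instance

def pvWitness_GetNewNonTerminal : (List (String × List String)) := [("S", ["a", "S"])]

def Spec_GetNewNonTerminal (productions : List (String × List String)) (out : String) : Prop := out = GetNewNonTerminal_alt productions
instance (productions : List (String × List String)) (out : String) : Decidable (Spec_GetNewNonTerminal productions out) := by unfold Spec_GetNewNonTerminal; infer_instance

-- ===== CLAIM (what is proved, stated in full; the proofs are below) =====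
def Claim_equal_GetNewNonTerminal : Prop := ∀ (productions : List (String × List String)), Dom_GetNewNonTerminal productions → Pre_GetNewNonTerminal productions → Spec_GetNewNonTerminal productions (GetNewNonTerminal productions)

-- ===== LEMMAS AND PROOFS =====

-- the keys set of A equals the keys set of B
theorem getNonTerminals_eq (productions : List (String × List String)) :
    GetNonTerminals productions = PySem.Set.ofList (productions.map Prod.fst) := by
  unfold GetNonTerminals
  rw [PySem.Set.ofList_eq_foldl, List.foldl_map]
  rfl

theorem foldl_min_of_le {a : String} {l : List String} (h : ∀ y ∈ l, a ≤ y) :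
    l.foldl min a = a := by
  induction l with
  | nil => rfl
  | cons y t ih =>
      simp only [List.foldl_cons]
      rw [min_eq_left (h y (List.mem_cons_self))]
      exact ih (fun z hz => h z (List.mem_cons_of_mem _ hz))

-- first free letter of a strictly increasing list = min of its free elements
theorem firstFree_eq_min (s : PySem.Set String) (l : List String)
    (hl : l.Pairwise (· < ·)) :
    pvFirstFree s l =
      ((PySem.List.min? (l.filter (fun c => !(PySem.Set.contains s c))) (fun x => x)).getD "") := by
  induction l with
  | nil => rfl
  | cons c rest ih =>
      rcases List.pairwise_cons.mp hl with ⟨hc, hrest⟩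
      by_cases h : c ∈ s
      · simp [pvFirstFree, h, ih hrest]
      · have hFalse : List.contains s c = false := by simpa using h
        simp only [pvFirstFree, PySem.Set.contains_eq_listContains, hFalse,
          Bool.false_eq_true, if_false, List.filter_cons, Bool.not_false, if_pos]
        rw [PySem.List.min?_id_cons]
        simp only [Option.getD_some]
        refine (foldl_min_of_le ?_).symm
        intro y hy
        exact le_of_lt (hc y (List.mem_of_mem_filter hy))

theorem pvUpper_pairwise : pvUpper.Pairwise (· < ·) := by
  have h : List.Pairwise (fun a b : String => a.toList < b.toList) pvUpper := by decide
  exact h.imp (fun hab => String.lt_iff_toList_lt.mpr hab)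

theorem diff_eq_filter (s : PySem.Set String) :
    PySem.Set.diff (PySem.Set.ofList pvUpper) s
      = pvUpper.filter (fun c => !(PySem.Set.contains s c)) := by
  have h : PySem.Set.ofList pvUpper = pvUpper := by decide
  rw [PySem.Set.diff, h]

-- ===== VERDICT (by name: the statement is the Claim_ definition above) =====
theorem GetNewNonTerminal_spec : Claim_equal_GetNewNonTerminal := by
  intro productions _ _
  unfold Spec_GetNewNonTerminal GetNewNonTerminal GetNewNonTerminal_alt
  rw [getNonTerminals_eq, diff_eq_filter]
  exact firstFree_eq_min _ _ pvUpper_pairwise
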